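-- pv_equiv track=rewrite | github.com/syntaxtic/my-interviews | google-foobar/2020/level-1.py | solution
-- ===== SOURCE A (Python) =====
-- def solution(data, n):
--     '''
--     Return the updated list
--     Time Complexity: O(n)
--     '''
--
--     counts = {}
--     result = []
--     # Count items and store into a dictionary for faster lookup
--     for item in data:
--         if item not in counts:
--             counts[item] = 1
--         else:
--             counts[item] += 1
--
--     # Select the elements met the requirement
--     for item in data:
--         if counts[item] <= n:
--             result.append(item)
--
--     return result
-- ===== SOURCE B (Python) =====
-- def solution(data, n):
--     # Group the positions of each value, keep whole groups of size <= n,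
--     # and rebuild the original order by sorting the kept positions.
--     positions = {}
--     for i, x in enumerate(data):
--         positions[x] = positions.get(x, []) + [i]
--     keep = []
--     for idxs in positions.values():
--         if len(idxs) <= n:
--             keep += idxs
--     keep.sort()
--     return [data[i] for i in keep]
-- ===== Notes on version B (the rewrite author's own statement) =====
-- stated objective: alternative
-- what changed: Instead of counting occurrences and filtering the data in order, B groups the positions of each value in a dict, keeps whole position-groups whose size is <= n, and rebuilds the original order by sorting the kept indices and mapping them back to values.
import Mathlib
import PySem

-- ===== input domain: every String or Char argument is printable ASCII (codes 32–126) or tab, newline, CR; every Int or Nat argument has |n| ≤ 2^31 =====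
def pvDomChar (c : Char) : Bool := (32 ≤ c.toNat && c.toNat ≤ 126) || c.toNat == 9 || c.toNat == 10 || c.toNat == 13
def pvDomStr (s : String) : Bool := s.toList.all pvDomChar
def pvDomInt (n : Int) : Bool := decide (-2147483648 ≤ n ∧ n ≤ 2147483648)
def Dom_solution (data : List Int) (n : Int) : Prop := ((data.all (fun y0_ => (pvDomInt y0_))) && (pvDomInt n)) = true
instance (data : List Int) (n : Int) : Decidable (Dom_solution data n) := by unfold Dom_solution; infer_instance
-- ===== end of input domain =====

-- B groups the positions of each value in a dict, keeps whole groups of size <= n, and rebuilds the order by sorting the kept indices (alternative algorithm, not faster).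


-- ===== PORT A =====
-- counts loop: 'if item not in counts: counts[item] = 1 else: counts[item] += 1'
def solutionCounts (data : List Int) : PySem.Dict Int Int :=
  data.foldl (fun d item =>
    if ¬ d.contains item then d.insert item 1 else d.modify item 0 (· + 1)) PySem.Dict.empty

def solution (data : List Int) (n : Int) : List Int :=
  let counts := solutionCounts data
  -- counts[item]: the key is always present after the counting loop, so getD is exact
  data.foldl (fun result item => if counts.getD item 0 ≤ n then result ++ [item] else result) []

-- ===== PORT B =====
-- 'for i, x in enumerate(data): positions[x] = positions.get(x, []) + [i]'
def solutionPositions (data : List Int) : PySem.Dict Int (List Int) :=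
  (PySem.List.enumerate data).foldl
    (fun d p => d.modify p.2 [] (fun l => l ++ [p.1])) PySem.Dict.empty

def solution_alt (data : List Int) (n : Int) : List Int :=
  let positions := solutionPositions data
  let keep := positions.values.foldl
    (fun keep idxs => if (idxs.length : Int) ≤ n then keep ++ idxs else keep) []
  -- keep.sort()
  let keepSorted := PySem.List.sorted keep (fun i => i) false
  -- data[i]: every i in keep is a valid index of data, so the default is never read
  keepSorted.map (fun i => PySem.List.pyGetD data i 0)

-- ===== PRECONDITION & SPEC =====
def Spec_solution (data : List Int) (n : Int) (out : List Int) : Prop := out = solution_alt data n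
instance (data : List Int) (n : Int) (out : List Int) : Decidable (Spec_solution data n out) := by unfold Spec_solution; infer_instance

-- ===== CLAIM (what is proved, stated in full; the proofs are below) =====
def Claim_equal_solution : Prop := ∀ (data : List Int) (n : Int), Dom_solution data n → Spec_solution data n (solution data n)

-- ===== LEMMAS AND PROOFS =====

-- A-side: counting loop computes list.count
lemma countsD (l : List Int) (d : PySem.Dict Int Int) (v : Int) :
    (l.foldl (fun d item =>
      if ¬ d.contains item then d.insert item 1 else d.modify item 0 (· + 1)) d).getD v 0
    = d.getD v 0 + l.count v := by
  induction l generalizing d with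
  | nil => simp
  | cons a t ih =>
    simp only [List.foldl_cons, ih]
    by_cases hc : d.contains a = true
    · rw [if_neg (by simp [hc]), PySem.Dict.getD_modify]
      by_cases hv : v = a
      · subst hv; simp; ring
      · simp [hv, Ne.symm hv]
    · rw [if_pos (by simp [hc]), PySem.Dict.getD_insert]
      by_cases hv : v = a
      · subst hv
        rw [PySem.Dict.getD_of_not_contains (h := by simpa using hc)]
        simp; ring
      · simp [hv, Ne.symm hv]

lemma counts_getD (data : List Int) (v : Int) :
    (solutionCounts data).getD v 0 = data.count v := by
  unfold solutionCounts
  rw [countsD]; simp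

lemma solution_eq_filter (data : List Int) (n : Int) :
    solution data n = data.filter (fun x => decide ((data.count x : Int) ≤ n)) := by
  unfold solution
  rw [PySem.List.foldl_append_ite_eq_filter]
  simp only [List.nil_append]
  apply List.filter_congr
  intro x _
  rw [counts_getD]

-- B-side lemmas

lemma positions_getD (data : List Int) (v : Int) :
    (solutionPositions data).getD v []
      = ((PySem.List.enumerate data).filter (fun p => p.2 == v)).map (fun p => p.1) := by
  unfold solutionPositions
  rw [show (List.foldl (fun (d : PySem.Dict Int (List Int)) (p : Int × Int) =>
        d.modify p.2 [] fun l => l ++ [p.1]) PySem.Dict.empty (PySem.List.enumerate data))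
      = List.foldl (fun d p => d.modify p.1 [] fun l => l ++ [p.2]) PySem.Dict.empty
          ((PySem.List.enumerate data).map Prod.swap) from
    (List.foldl_map (f := Prod.swap)
      (g := fun (d : PySem.Dict Int (List Int)) (p : Int × Int) => d.modify p.1 [] fun l => l ++ [p.2])
      (l := PySem.List.enumerate data) (init := PySem.Dict.empty)).symm]
  rw [PySem.Dict.getD_foldl_modify_append]
  simp [List.filter_map, List.map_map, Function.comp_def]

lemma positions_keys (data : List Int) :
    (solutionPositions data).keys = PySem.Set.ofList data := by
  unfold solutionPositions
  rw [PySem.Dict.keys_foldl_modify_key (PySem.List.enumerate data) (fun p => p.2) []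
        (fun _ p => fun l => l ++ [p.1]) PySem.Dict.empty]
  rw [PySem.Dict.keys_empty, PySem.List.map_snd_enumerate]
  rfl

lemma positions_keys_nodup (data : List Int) : (solutionPositions data).keys.Nodup := by
  rw [positions_keys]; exact PySem.Set.nodup_ofList data

lemma enum_fst_inj (data : List Int) {p q : Int × Int}
    (hp : p ∈ PySem.List.enumerate data) (hq : q ∈ PySem.List.enumerate data)
    (h : p.1 = q.1) : p = q := by
  rw [PySem.List.mem_enumerate_iff] at hp hq
  obtain ⟨k, hk, rfl⟩ := hp
  obtain ⟨k', hk', rfl⟩ := hq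
  simp only [zero_add] at h
  have : k = k' := by exact_mod_cast h
  subst this; rfl

lemma bucket_len (data : List Int) (v : Int) :
    ((solutionPositions data).getD v []).length = data.count v := by
  rw [positions_getD, List.length_map, ← List.countP_eq_length_filter]
  conv_rhs => rw [← PySem.List.map_snd_enumerate data 0]
  rw [List.count_eq_countP, List.countP_map]
  simp [Function.comp_def]

lemma alt_eq_filter (data : List Int) (n : Int) :
    (let positions := solutionPositions data
     let keep := positions.values.foldl
       (fun keep idxs => if (idxs.length : Int) ≤ n then keep ++ idxs else keep) []
     let keepSorted := PySem.List.sorted keep (fun i => i) false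
     keepSorted.map (fun i => PySem.List.pyGetD data i 0))
    = data.filter (fun x => decide ((data.count x : Int) ≤ n)) := by
  simp only []
  set e := PySem.List.enumerate data 0 with he
  set G : Int × Int → Bool := fun p => decide ((data.count p.2 : Int) ≤ n) with hG
  set S : List Int := (e.filter G).map (fun p => p.1) with hS
  set idxs : Int → List Int := fun v => (e.filter (fun p => p.2 == v)).map (fun p => p.1) with hidxs
  -- rewrite keep into a flatMap over the good keys
  rw [PySem.Dict.values_eq_map_keys _ (positions_keys_nodup data) []]
  rw [PySem.List.foldl_ite_eq_foldl_filter (p := fun idxs : List Int => ((idxs.length : Int) ≤ n))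
      (f := fun (acc : List Int) x => acc ++ x)]
  rw [PySem.List.foldl_append_eq_flatten, List.nil_append, List.filter_map, ← List.flatMap_def]
  rw [positions_keys]
  have hfc : List.filter ((fun idxs : List Int => decide ((idxs.length : Int) ≤ n)) ∘
        fun k => (solutionPositions data).getD k []) (PySem.Set.ofList data)
      = List.filter (fun v => decide ((data.count v : Int) ≤ n)) (PySem.Set.ofList data) := by
    apply List.filter_congr
    intro v _
    simp [bucket_len]
  rw [hfc]
  have hfun : (fun k => (solutionPositions data).getD k []) = idxs := funext (positions_getD data)
  rw [hfun]
  set keysF := List.filter (fun v => decide ((data.count v : Int) ≤ n)) (PySem.Set.ofList data) with hkeysF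
  set keep := keysF.flatMap idxs with hkeep
  -- pairwise < facts
  have hSlt : S.Pairwise (· < ·) := by
    exact ((PySem.List.pairwise_lt_enumerate data 0).filter G).map _ (fun a b h => h)
  have hSnd : S.Nodup := hSlt.imp (fun h => ne_of_lt h)
  have hbnd : ∀ v, (idxs v).Nodup := by
    intro v
    have : (idxs v).Pairwise (· < ·) :=
      ((PySem.List.pairwise_lt_enumerate data 0).filter _).map _ (fun a b h => h)
    exact this.imp (fun h => ne_of_lt h)
  have hkeepnd : keep.Nodup := by
    rw [hkeep, List.nodup_flatMap]
    constructor
    · intro v _; exact hbnd v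
    · have hkF : keysF.Nodup := (PySem.Set.nodup_ofList data).filter _
      refine hkF.imp ?_
      intro v w hne i hi1 hi2
      obtain ⟨p, hp, hpi⟩ := List.mem_map.mp hi1
      obtain ⟨q, hq, hqi⟩ := List.mem_map.mp hi2
      obtain ⟨hpe, hpv⟩ := List.mem_filter.mp hp
      obtain ⟨hqe, hqv⟩ := List.mem_filter.mp hq
      have := enum_fst_inj data hpe hqe (hpi.trans hqi.symm)
      apply hne
      have h1 : p.2 = v := by simpa using hpv
      have h2 : q.2 = w := by simpa using hqv
      rw [← h1, ← h2, this]
  have hmem : ∀ i, i ∈ S ↔ i ∈ keep := by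
    intro i
    constructor
    · intro hi
      obtain ⟨p, hp, hpi⟩ := List.mem_map.mp hi
      obtain ⟨hpe, hpg⟩ := List.mem_filter.mp hp
      rw [hkeep, List.mem_flatMap]
      refine ⟨p.2, ?_, ?_⟩
      · rw [hkeysF, List.mem_filter]
        constructor
        · rw [PySem.Set.mem_ofList]
          have : p.2 ∈ e.map (fun p => p.2) := List.mem_map.mpr ⟨p, hpe, rfl⟩
          rwa [he, PySem.List.map_snd_enumerate] at this
        · exact hpg
      · exact List.mem_map.mpr ⟨p, List.mem_filter.mpr ⟨hpe, by simp⟩, hpi⟩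
    · intro hi
      rw [hkeep, List.mem_flatMap] at hi
      obtain ⟨v, hv, hiv⟩ := hi
      obtain ⟨p, hp, hpi⟩ := List.mem_map.mp hiv
      obtain ⟨hpe, hpv⟩ := List.mem_filter.mp hp
      have hgv : decide ((data.count v : Int) ≤ n) = true := (List.mem_filter.mp hv).2
      have h2 : p.2 = v := by simpa using hpv
      refine List.mem_map.mpr ⟨p, List.mem_filter.mpr ⟨hpe, ?_⟩, hpi⟩
      show decide ((data.count p.2 : Int) ≤ n) = true
      rw [h2]; exact hgv
  have hperm : S.Perm keep := (List.perm_ext_iff_of_nodup hSnd hkeepnd).mpr hmem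
  rw [PySem.List.sorted_eq_of_perm_of_pairwise_lt keep S (fun i => i) hperm hSlt]
  -- final: map indices back to values
  rw [hS, List.map_map]
  have : List.map ((fun i => PySem.List.pyGetD data i 0) ∘ fun p => p.1) (e.filter G)
      = List.map (fun p => p.2) (e.filter G) := by
    apply List.map_congr_left
    intro p hp
    have hpe := (List.mem_filter.mp hp).1
    rw [he, PySem.List.mem_enumerate_iff] at hpe
    obtain ⟨k, hk, rfl⟩ := hpe
    simp [PySem.List.pyGetD_natCast, hk]
  rw [this]
  have key : ∀ (P : Int → Bool),
      (e.filter (fun p => P p.2)).map (fun p => p.2) = data.filter P := by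
    intro P
    conv_rhs => rw [← PySem.List.map_snd_enumerate data 0, List.filter_map]
    rfl
  exact key (fun x => decide ((data.count x : Int) ≤ n))

theorem solution_spec : Claim_equal_solution := by
  intro data n _
  unfold Spec_solution
  rw [solution_eq_filter]
  unfold solution_alt
  exact (alt_eq_filter data n).symm
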